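-- pv_equiv track=rewrite | github.com/jiacheng-xu/neu-compression-sum | neusum/data/generate_oracle_with_dplp.py | convert_edu_doc_to_sent_doc
-- ===== SOURCE A (Python) =====
-- def convert_edu_doc_to_sent_doc(doc):
--     buff = []
--     bag = []
--     for i, content in enumerate(doc):
--         if '@@SS@@' in content:
--             buff.append(content)
--             buff = ' '.join(buff)
--             bag.append(buff)
--             buff = []
--         else:
--             buff.append(content)
--     if buff != []:
--         buff = ' '.join(buff)
--         bag.append(buff)
--     return bag
-- ===== SOURCE B (Python) =====
-- def convert_edu_doc_to_sent_doc(doc):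
--     boundaries = [i for i, c in enumerate(doc) if '@@SS@@' in c]
--     bag = []
--     start = 0
--     for idx in boundaries:
--         bag.append(' '.join(doc[start:idx + 1]))
--         start = idx + 1
--     if start < len(doc):
--         bag.append(' '.join(doc[start:]))
--     return bag
-- ===== Notes on version B (the rewrite author's own statement) =====
-- stated objective: alternative
-- what changed: B first collects the list of marker indices in one pass and then builds each sentence by slicing doc between consecutive boundaries, instead of A's inline buffer that is flushed into the bag whenever a marker element is seen.
import Mathlib
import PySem

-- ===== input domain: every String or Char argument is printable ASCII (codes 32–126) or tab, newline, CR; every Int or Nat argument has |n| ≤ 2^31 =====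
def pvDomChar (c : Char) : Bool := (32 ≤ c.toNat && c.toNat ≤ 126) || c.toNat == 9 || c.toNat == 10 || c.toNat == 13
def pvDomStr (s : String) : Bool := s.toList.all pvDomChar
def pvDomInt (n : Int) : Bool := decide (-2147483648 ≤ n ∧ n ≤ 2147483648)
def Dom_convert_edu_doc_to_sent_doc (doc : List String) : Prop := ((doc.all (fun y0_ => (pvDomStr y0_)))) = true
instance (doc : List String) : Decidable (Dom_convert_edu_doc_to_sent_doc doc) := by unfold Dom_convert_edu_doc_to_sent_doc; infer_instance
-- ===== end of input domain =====

-- B separates boundary-finding from segment construction: it collects the marker indices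
-- first and then slices doc between consecutive boundaries, instead of A's inline buffer.


-- ===== PORT A =====
-- A's loop: buffer of pending EDUs, flushed into bag at each marker element
def pvALoop (buff bag : List String) : List String → List String × List String
  | [] => (buff, bag)
  | c :: rest =>
    if PySem.Str.isIn "@@SS@@" c then
      pvALoop [] (bag ++ [PySem.Str.join " " (buff ++ [c])]) rest
    else
      pvALoop (buff ++ [c]) bag rest

-- A's trailing 'if buff != []' flush
def pvAFinish (r : List String × List String) : List String :=
  if r.1 ≠ [] then r.2 ++ [PySem.Str.join " " r.1] else r.2

def convert_edu_doc_to_sent_doc (doc : List String) : List String :=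
  pvAFinish (pvALoop [] [] doc)

-- ===== PORT B =====
-- B's loop body: append the slice doc[start:idx+1] to bag, move start to idx+1
def pvBStep (doc : List String) (st : List String × Int) (idx : Int) : List String × Int :=
  (st.1 ++ [PySem.Str.join " " (PySem.List.slice doc (some st.2) (some (idx + 1)))], idx + 1)

-- B's trailing 'if start < len(doc)' slice
def pvBFinish (doc : List String) (r : List String × Int) : List String :=
  if r.2 < (doc.length : Int) then r.1 ++ [PySem.Str.join " " (PySem.List.slice doc (some r.2) none)] else r.1

def convert_edu_doc_to_sent_doc_alt (doc : List String) : List String :=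
  pvBFinish doc
    ((((PySem.List.enumerate doc 0).filter (fun p => PySem.Str.isIn "@@SS@@" p.2)).map (·.1)).foldl
      (pvBStep doc) ([], 0))

-- ===== PRECONDITION & SPEC =====
def Spec_convert_edu_doc_to_sent_doc (doc : List String) (out : List String) : Prop := out = convert_edu_doc_to_sent_doc_alt doc
instance (doc : List String) (out : List String) : Decidable (Spec_convert_edu_doc_to_sent_doc doc out) := by unfold Spec_convert_edu_doc_to_sent_doc; infer_instance

-- ===== CLAIM (what is proved, stated in full; the proofs are below) =====
def Claim_equal_convert_edu_doc_to_sent_doc : Prop := ∀ (doc : List String), Dom_convert_edu_doc_to_sent_doc doc → Spec_convert_edu_doc_to_sent_doc doc (convert_edu_doc_to_sent_doc doc)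

-- ===== LEMMAS AND PROOFS =====

-- common reference function: the sentences of doc, given pending buffer buff
def pvSegs (buff : List String) : List String → List String
  | [] => if buff = [] then [] else [PySem.Str.join " " buff]
  | c :: rest =>
    if PySem.Str.isIn "@@SS@@" c then PySem.Str.join " " (buff ++ [c]) :: pvSegs [] rest
    else pvSegs (buff ++ [c]) rest

-- marker positions of doc, as naturals relative to doc's head
def pvBIdx : List String → List Nat
  | [] => []
  | c :: rest =>
    if PySem.Str.isIn "@@SS@@" c then 0 :: (pvBIdx rest).map (· + 1)
    else (pvBIdx rest).map (· + 1)

-- B's fold plus trailing segment, as a recursion over the index list, in Nat form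
def pvFinLoop (full : List String) : List Nat → Nat → List String
  | [], s => if s < full.length then [PySem.Str.join " " (full.drop s)] else []
  | i :: is, s => PySem.Str.join " " ((full.drop s).take (i + 1 - s)) :: pvFinLoop full is (i + 1)

theorem pvALoop_eq (doc : List String) : ∀ (buff bag : List String),
    pvAFinish (pvALoop buff bag doc) = bag ++ pvSegs buff doc := by
  induction doc with
  | nil =>
    intro buff bag
    simp only [pvALoop, pvSegs, pvAFinish]
    by_cases h : buff = [] <;> simp [h]
  | cons c rest ih =>
    intro buff bag
    simp only [pvALoop, pvSegs]
    cases hb : PySem.Str.isIn "@@SS@@" c <;> simp [ih]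

theorem pvEnum_filter (doc : List String) : ∀ (s : Int),
    ((PySem.List.enumerate doc s).filter (fun p => PySem.Str.isIn "@@SS@@" p.2)).map (·.1)
      = (pvBIdx doc).map (fun k : Nat => s + (k : Int)) := by
  induction doc with
  | nil => intro s; simp [PySem.List.enumerate_nil, pvBIdx]
  | cons c rest ih =>
    intro s
    rw [PySem.List.enumerate_cons]
    simp only [List.filter_cons, pvBIdx]
    cases hb : PySem.Str.isIn "@@SS@@" c
    · simp only [Bool.false_eq_true, if_false, List.map_map, ih (s + 1)]
      apply List.map_congr_left
      intro k _
      simp only [Function.comp_apply]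
      push_cast; ring
    · simp only [if_true, List.map_cons, List.map_map, ih (s + 1)]
      congr 1
      · push_cast; ring
      · apply List.map_congr_left
        intro k _
        simp only [Function.comp_apply]
        push_cast; ring

theorem pvFold_eq (doc : List String) : ∀ (idxs : List Nat) (bag : List String) (s : Nat),
    pvBFinish doc ((idxs.map (fun k : Nat => (k : Int))).foldl (pvBStep doc) (bag, (s : Int)))
      = bag ++ pvFinLoop doc idxs s := by
  intro idxs
  induction idxs with
  | nil =>
    intro bag s
    simp only [List.map_nil, List.foldl_nil, pvFinLoop, pvBFinish]
    rw [PySem.List.slice_from _ (by exact_mod_cast Nat.zero_le s)]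
    by_cases h : s < doc.length <;> simp [h, Int.toNat_natCast]
  | cons i is ih =>
    intro bag s
    simp only [List.map_cons, List.foldl_cons, pvFinLoop]
    have h1 : pvBStep doc (bag, (s : Int)) (i : Int)
        = (bag ++ [PySem.Str.join " " ((doc.drop s).take (i + 1 - s))], ((i + 1 : Nat) : Int)) := by
      simp only [pvBStep]
      rw [show ((i : Int) + 1) = ((i + 1 : Nat) : Int) by push_cast; ring]
      rw [PySem.List.slice_toNat _ (by exact_mod_cast Nat.zero_le s) (by exact_mod_cast Nat.zero_le (i + 1))]
      simp [Int.toNat_natCast]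
    rw [h1, ih _ (i + 1)]
    simp

theorem pvFinLoop_eq (doc : List String) : ∀ (buff full : List String) (s : Nat),
    full.drop s = buff ++ doc → s ≤ full.length →
    pvFinLoop full ((pvBIdx doc).map (fun k => s + buff.length + k)) s = pvSegs buff doc := by
  induction doc with
  | nil =>
    intro buff full s hdrop hs
    simp only [pvBIdx, List.map_nil, pvFinLoop, pvSegs]
    simp only [List.append_nil] at hdrop
    have hlen := List.length_drop (l := full) (i := s)
    rw [hdrop] at hlen
    by_cases h : s < full.length
    · have hne : buff ≠ [] := by intro hb; rw [hb] at hlen; simp at hlen; omega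
      simp [h, hne, hdrop]
    · have hnil : buff = [] := by
        cases hbc : buff with
        | nil => rfl
        | cons a b => exfalso; rw [hbc] at hlen; simp at hlen; omega
      simp [h, hnil]
  | cons c rest ih =>
    intro buff full s hdrop hs
    have hlen := List.length_drop (l := full) (i := s)
    rw [hdrop] at hlen
    have hlen' : s + buff.length + 1 ≤ full.length := by simp at hlen; omega
    have hdrop' : full.drop (s + buff.length + 1) = rest := by
      have h2 : full.drop (s + buff.length + 1) = (full.drop s).drop (buff.length + 1) := by
        rw [List.drop_drop]; ring_nf
      rw [h2, hdrop, List.drop_append]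
      simp
    have htake : (full.drop s).take (buff.length + 1) = buff ++ [c] := by
      rw [hdrop, List.take_append]
      simp
    simp only [pvBIdx, pvSegs]
    cases hb : PySem.Str.isIn "@@SS@@" c
    · simp only [Bool.false_eq_true, if_false, List.map_map]
      rw [show List.map ((fun k => s + buff.length + k) ∘ (· + 1)) (pvBIdx rest)
            = List.map (fun k => s + (buff ++ [c]).length + k) (pvBIdx rest) by
          apply List.map_congr_left; intro k _; simp [Function.comp]; omega]
      apply ih (buff ++ [c]) full s _ hs
      rw [hdrop]; simp
    · simp only [if_true, List.map_cons, List.map_map, pvFinLoop]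
      rw [show s + buff.length + 0 + 1 - s = buff.length + 1 by omega, htake]
      rw [show s + buff.length + 0 + 1 = s + buff.length + 1 by omega]
      rw [show List.map ((fun k => s + buff.length + k) ∘ (· + 1)) (pvBIdx rest)
            = List.map (fun k => (s + buff.length + 1) + ([] : List String).length + k) (pvBIdx rest) by
          apply List.map_congr_left; intro k _; simp [Function.comp]; omega]
      rw [ih [] full (s + buff.length + 1) (by simpa using hdrop') (by omega)]

-- ===== VERDICT (by name: the statement is the Claim_ definition above) =====
theorem convert_edu_doc_to_sent_doc_spec : Claim_equal_convert_edu_doc_to_sent_doc := by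
  intro doc _
  unfold Spec_convert_edu_doc_to_sent_doc convert_edu_doc_to_sent_doc convert_edu_doc_to_sent_doc_alt
  rw [pvALoop_eq doc [] [], pvEnum_filter doc 0]
  rw [show (pvBIdx doc).map (fun k : Nat => (0 : Int) + (k : Int)) = (pvBIdx doc).map (fun k : Nat => (k : Int)) by simp]
  have hf := pvFold_eq doc (pvBIdx doc) [] 0
  simp only [Nat.cast_zero] at hf
  rw [hf]
  have hc := pvFinLoop_eq doc [] doc 0 (by simp) (by simp)
  simp only [List.length_nil, Nat.add_zero, Nat.zero_add, List.map_id'] at hc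
  rw [hc]
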